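-- pv_equiv track=rewrite | github.com/Xiao-Li-1011/some-assignment | COMP9021-Ass1/superpower.py | consecutive_hero_max
-- ===== SOURCE A (Python) =====
-- def consecutive_hero_max(input_number):
--     '''
--     need to consider switching nothing, then use for in for to find
--     the largest sum of switched list
--     >>> consecutive_hero_once([-7,1,2,3,4], 5)
--     17
--     >>> consecutive_hero_once([4,-3,1,2,-7], 3)
--     11
--     >>> consecutive_hero_once([1,2,3,4,5], 2)
--     15
--     '''
--     output_number = [i for i in input_number]
--     Sum_number = []
--     Sum_number.append(sum(output_number))
--     for i in range(1,len(output_number) + 1):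
--         for j in range(0, len(output_number) - i + 1):
--             Sum_number.append(sum(output_number) - sum(output_number[j : j + i] * 2))
--     return max(Sum_number)
-- ===== SOURCE B (Python) =====
-- def consecutive_hero_max(input_number):
--     # Kadane: answer = total - 2 * min(0, minimum contiguous-subarray sum)
--     total = 0
--     cur = 0
--     best = 0
--     for x in input_number:
--         total += x
--         cur = min(x, cur + x)
--         best = min(best, cur)
--     return total - 2 * best
-- ===== Notes on version B (the rewrite author's own statement) =====
-- stated objective: faster
-- what changed: Replaced the O(n^3) enumeration of every subarray (recomputing each slice sum) by a single Kadane pass tracking the minimum subarray sum, returning total - 2*min(0, minSubarraySum).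
import Mathlib
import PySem

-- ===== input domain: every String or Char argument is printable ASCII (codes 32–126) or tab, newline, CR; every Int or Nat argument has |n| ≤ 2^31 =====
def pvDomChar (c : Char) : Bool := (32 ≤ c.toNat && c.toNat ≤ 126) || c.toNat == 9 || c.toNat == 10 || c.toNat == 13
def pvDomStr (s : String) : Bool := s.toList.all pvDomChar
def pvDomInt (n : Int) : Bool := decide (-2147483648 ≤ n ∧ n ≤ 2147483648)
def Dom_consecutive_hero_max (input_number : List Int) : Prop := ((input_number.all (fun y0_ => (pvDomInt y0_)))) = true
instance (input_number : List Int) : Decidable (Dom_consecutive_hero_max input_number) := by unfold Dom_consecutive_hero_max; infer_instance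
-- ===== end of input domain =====

-- B replaces A's O(n^3) enumeration of every subarray by one Kadane pass over the list (objective: faster, asymptotic).

-- ===== PORT A =====
-- Literal port of A: copy the list, append the total, then for every length i and start j
-- append total - sum(xs[j:j+i] * 2)  (list repetition: the slice concatenated with itself), return max.
def consecutive_hero_max (input_number : List Int) : Int :=
  let output_number := input_number.map (fun i => i)
  let Sum_number : List Int := [] ++ [output_number.sum]
  let Sum_number :=
    (PySem.List.pyRange 1 ((output_number.length : Int) + 1) 1).foldl (fun acc i =>
      (PySem.List.pyRange 0 ((output_number.length : Int) - i + 1) 1).foldl (fun acc j =>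
        acc ++ [output_number.sum -
          (PySem.List.slice output_number (some j) (some (j + i)) ++
           PySem.List.slice output_number (some j) (some (j + i))).sum]) acc) Sum_number
  -- max(Sum_number): Sum_number is never empty (the total is appended first), so getD 0 is never used
  (PySem.List.max? Sum_number (fun y => y)).getD 0

-- ===== PORT B =====
-- Literal port of B (Source B): one fold maintaining (total, cur, best) — Kadane for minimum subarray sum.
def consecutive_hero_max_alt (input_number : List Int) : Int :=
  let s := input_number.foldl
    (fun (acc : Int × Int × Int) x =>
      let total := acc.1 + x
      let cur := min x (acc.2.1 + x)
      (total, cur, min acc.2.2 cur))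
    (0, 0, 0)
  s.1 - 2 * s.2.2

-- ===== PRECONDITION & SPEC =====
def Spec_consecutive_hero_max (input_number : List Int) (out : Int) : Prop := out = consecutive_hero_max_alt input_number
instance (input_number : List Int) (out : Int) : Decidable (Spec_consecutive_hero_max input_number out) := by unfold Spec_consecutive_hero_max; infer_instance

-- ===== CLAIM (what is proved, stated in full; the proofs are below) =====
def Claim_equal_consecutive_hero_max : Prop := ∀ (input_number : List Int), Dom_consecutive_hero_max input_number → Spec_consecutive_hero_max input_number (consecutive_hero_max input_number)

-- ===== LEMMAS AND PROOFS =====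

-- s is the sum of a nonempty contiguous subarray of xs
def IsSub (xs : List Int) (s : Int) : Prop :=
  ∃ p m q : List Int, m ≠ [] ∧ xs = p ++ m ++ q ∧ s = m.sum

-- s is the sum of a nonempty suffix of xs
def IsSuf (xs : List Int) (s : Int) : Prop :=
  ∃ p m : List Int, m ≠ [] ∧ xs = p ++ m ∧ s = m.sum

-- b is the minimum of 0 and all contiguous-subarray sums of xs
def IsMinSub (xs : List Int) (b : Int) : Prop :=
  (b = 0 ∨ IsSub xs b) ∧ b ≤ 0 ∧ ∀ s, IsSub xs s → b ≤ s

lemma isMinSub_unique {xs : List Int} {b₁ b₂ : Int}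
    (h₁ : IsMinSub xs b₁) (h₂ : IsMinSub xs b₂) : b₁ = b₂ := by
  obtain ⟨m₁, z₁, lb₁⟩ := h₁
  obtain ⟨m₂, z₂, lb₂⟩ := h₂
  apply le_antisymm
  · rcases m₂ with h | h
    · omega
    · exact lb₁ _ h
  · rcases m₁ with h | h
    · omega
    · exact lb₂ _ h

-- generic foldl-min facts
lemma foldl_min_le_init (L : List Int) (a : Int) : L.foldl min a ≤ a := by
  induction L generalizing a with
  | nil => simp
  | cons x t ih => exact le_trans (ih (min a x)) (min_le_left a x)

lemma foldl_min_le_mem {L : List Int} {x : Int} (hx : x ∈ L) (a : Int) : L.foldl min a ≤ x := by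
  induction L generalizing a with
  | nil => cases hx
  | cons y t ih =>
    rcases List.mem_cons.mp hx with rfl | hx'
    · exact le_trans (foldl_min_le_init t (min a x)) (min_le_right a x)
    · exact ih hx' (min a y)

lemma foldl_min_mem (L : List Int) (a : Int) : L.foldl min a = a ∨ L.foldl min a ∈ L := by
  induction L generalizing a with
  | nil => simp
  | cons y t ih =>
    rcases ih (min a y) with h | h
    · rcases le_total a y with hy | hy
      · left; rw [List.foldl_cons, h]; omega
      · right; rw [List.foldl_cons, h, min_eq_right hy]; exact List.mem_cons_self
    · right; exact List.mem_cons_of_mem _ h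

-- max over list of (T - 2*s) is T - 2 * (min over the s's)
lemma foldl_max_sub (L : List Int) (T a : Int) :
    (L.map (fun s => T - 2 * s)).foldl max (T - 2 * a) = T - 2 * L.foldl min a := by
  induction L generalizing a with
  | nil => simp
  | cons x t ih =>
    have : max (T - 2 * a) (T - 2 * x) = T - 2 * min a x := by omega
    simp only [List.map_cons, List.foldl_cons, this, ih]

-- the slice-sum list A enumerates
def aSums (xs : List Int) : List Int :=
  (PySem.List.pyRange 1 ((xs.length : Int) + 1) 1).flatMap (fun i =>
    (PySem.List.pyRange 0 ((xs.length : Int) - i + 1) 1).map (fun j =>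
      (PySem.List.slice xs (some j) (some (j + i))).sum))

lemma aSums_mem_isSub {xs : List Int} {s : Int} (hs : s ∈ aSums xs) : IsSub xs s := by
  simp only [aSums, List.mem_flatMap, List.mem_map, PySem.List.mem_pyRange_one] at hs
  obtain ⟨i, ⟨hi1, hi2⟩, j, ⟨hj1, hj2⟩, heq⟩ := hs
  rw [PySem.List.slice_toNat xs hj1 (by omega)] at heq
  have hti : (j + i).toNat - j.toNat = i.toNat := by omega
  rw [hti] at heq
  have hlen : j.toNat + i.toNat ≤ xs.length := by omega
  refine ⟨xs.take j.toNat, (xs.drop j.toNat).take i.toNat, (xs.drop j.toNat).drop i.toNat,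
    ?_, ?_, heq.symm⟩
  · apply List.ne_nil_of_length_pos
    rw [List.length_take, List.length_drop]
    omega
  · rw [List.append_assoc, List.take_append_drop, List.take_append_drop]

lemma isSub_mem_aSums {xs : List Int} {s : Int} (hs : IsSub xs s) : s ∈ aSums xs := by
  obtain ⟨p, m, q, hm, rfl, rfl⟩ := hs
  have hmlen : 0 < m.length := List.length_pos_iff.mpr hm
  simp only [aSums, List.mem_flatMap, List.mem_map, PySem.List.mem_pyRange_one]
  refine ⟨(m.length : Int), ⟨by exact_mod_cast hmlen, ?_⟩, (p.length : Int),
    ⟨by positivity, ?_⟩, ?_⟩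
  · simp only [List.length_append]; push_cast; omega
  · simp only [List.length_append]; push_cast; omega
  · rw [PySem.List.slice_natCast_add,
      show p ++ m ++ q = p ++ (m ++ q) from List.append_assoc .. ,
      List.drop_left, List.take_left]

lemma a_char (xs : List Int) :
    consecutive_hero_max xs = xs.sum - 2 * (aSums xs).foldl min 0 := by
  simp only [consecutive_hero_max, List.map_id']
  simp only [PySem.List.foldl_append_singleton_eq_map,
    PySem.List.foldl_append_eq_flatMap, List.nil_append, List.singleton_append]
  rw [PySem.List.max?_id_cons, Option.getD_some]
  have hmap : ((PySem.List.pyRange 1 ((xs.length : Int) + 1) 1).flatMap (fun i =>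
      (PySem.List.pyRange 0 ((xs.length : Int) - i + 1) 1).map (fun j =>
        xs.sum - (PySem.List.slice xs (some j) (some (j + i)) ++
                  PySem.List.slice xs (some j) (some (j + i))).sum)))
      = (aSums xs).map (fun s => xs.sum - 2 * s) := by
    simp only [aSums, List.map_flatMap, List.map_map, Function.comp_def,
      List.sum_append, two_mul]
  rw [hmap]
  simpa using foldl_max_sub (aSums xs) xs.sum 0

lemma a_min_isMinSub (xs : List Int) : IsMinSub xs ((aSums xs).foldl min 0) := by
  constructor
  · rcases foldl_min_mem (aSums xs) 0 with h | h
    · exact Or.inl h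
    · exact Or.inr (aSums_mem_isSub h)
  · exact ⟨foldl_min_le_init _ _, fun s hs => foldl_min_le_mem (isSub_mem_aSums hs) 0⟩

-- suffix / subarray decomposition when one element is appended
lemma isSuf_append_singleton (ys : List Int) (x s : Int) :
    IsSuf (ys ++ [x]) s ↔ s = x ∨ ∃ s₀, IsSuf ys s₀ ∧ s = s₀ + x := by
  constructor
  · rintro ⟨p, m, hm, heq, rfl⟩
    rcases List.eq_nil_or_concat m with rfl | ⟨m', x', rfl⟩
    · exact absurd rfl hm
    · simp only [List.concat_eq_append, ← List.append_assoc] at heq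
      obtain ⟨h1, h2⟩ := List.append_inj' heq (by simp)
      obtain rfl : x' = x := by simpa using h2.symm
      rcases m' with _ | ⟨y, t⟩
      · left; simp
      · right
        exact ⟨(y :: t).sum, ⟨p, y :: t, by simp, h1, rfl⟩, by simp [add_assoc]⟩
  · rintro (hx | ⟨s₀, ⟨p, m, hm, rfl, rfl⟩, rfl⟩)
    · exact ⟨ys, [x], by simp, rfl, by simp [hx]⟩
    · exact ⟨p, m ++ [x], by simp, by simp, by simp⟩

lemma isSub_append_singleton (ys : List Int) (x s : Int) :
    IsSub (ys ++ [x]) s ↔ IsSub ys s ∨ IsSuf (ys ++ [x]) s := by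
  constructor
  · rintro ⟨p, m, q, hm, heq, rfl⟩
    rcases List.eq_nil_or_concat q with rfl | ⟨q', x', rfl⟩
    · right; exact ⟨p, m, hm, by simpa using heq, rfl⟩
    · left
      simp only [List.concat_eq_append] at heq
      rw [show (p ++ m) ++ (q' ++ [x']) = ((p ++ m) ++ q') ++ [x'] by simp] at heq
      obtain ⟨h1, h2⟩ := List.append_inj' heq (by simp)
      exact ⟨p, m, q', hm, by simpa using h1, rfl⟩
  · rintro (⟨p, m, q, hm, rfl, rfl⟩ | ⟨p, m, hm, heq, rfl⟩)
    · exact ⟨p, m, q ++ [x], hm, by simp, rfl⟩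
    · exact ⟨p, m, [], hm, by simpa using heq, rfl⟩

-- the Kadane fold state
def kfold (xs : List Int) : Int × Int × Int :=
  xs.foldl
    (fun (acc : Int × Int × Int) x =>
      let total := acc.1 + x
      let cur := min x (acc.2.1 + x)
      (total, cur, min acc.2.2 cur))
    (0, 0, 0)

lemma kfold_invariant (xs : List Int) :
    (kfold xs).1 = xs.sum ∧
    ((xs = [] ∧ (kfold xs).2.1 = 0) ∨ IsSuf xs (kfold xs).2.1) ∧
    (∀ s, IsSuf xs s → (kfold xs).2.1 ≤ s) ∧
    IsMinSub xs (kfold xs).2.2 := by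
  induction xs using List.reverseRecOn with
  | nil =>
    refine ⟨rfl, Or.inl ⟨rfl, rfl⟩, ?_, Or.inl rfl, le_refl _, ?_⟩
    · rintro s ⟨p, m, hm, heq, -⟩
      exact absurd (List.append_eq_nil_iff.mp heq.symm).2 hm
    · rintro s ⟨p, m, q, hm, heq, -⟩
      exact absurd (List.append_eq_nil_iff.mp
        (List.append_eq_nil_iff.mp heq.symm).1).2 hm
  | append_singleton ys x ih =>
    obtain ⟨ht, hcmem, hcmin, hbmem, hbz, hbmin⟩ := ih
    have hstep : kfold (ys ++ [x]) =
        ((kfold ys).1 + x, min x ((kfold ys).2.1 + x),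
          min (kfold ys).2.2 (min x ((kfold ys).2.1 + x))) := by
      simp [kfold, List.foldl_append]
    set t := (kfold ys).1 with hT
    set c := (kfold ys).2.1 with hC
    set b := (kfold ys).2.2 with hB
    rw [hstep]
    dsimp only
    have hc'suf : IsSuf (ys ++ [x]) (min x (c + x)) := by
      rcases le_total x (c + x) with h | h
      · rw [min_eq_left h]
        exact (isSuf_append_singleton ys x x).mpr (Or.inl rfl)
      · rw [min_eq_right h]
        rcases hcmem with ⟨rfl, hc0⟩ | hsuf
        · rw [hc0]
          simpa using (isSuf_append_singleton [] x x).mpr (Or.inl rfl)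
        · exact (isSuf_append_singleton ys x (c + x)).mpr (Or.inr ⟨c, hsuf, rfl⟩)
    refine ⟨by simp [ht], Or.inr hc'suf, ?_, ?_, ?_, ?_⟩
    · -- cur minimality
      intro s hs
      rcases (isSuf_append_singleton ys x s).mp hs with rfl | ⟨s₀, hs₀, rfl⟩
      · exact min_le_left _ _
      · have := hcmin s₀ hs₀
        have h2 := min_le_right x (c + x)
        omega
    · -- best membership
      rcases le_total b (min x (c + x)) with h | h
      · rw [min_eq_left h]
        rcases hbmem with h0 | hsub
        · exact Or.inl h0
        · exact Or.inr ((isSub_append_singleton ys x b).mpr (Or.inl hsub))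
      · rw [min_eq_right h]
        exact Or.inr ((isSub_append_singleton ys x _).mpr (Or.inr hc'suf))
    · -- best ≤ 0
      have := min_le_left b (min x (c + x))
      omega
    · -- best minimality
      intro s hs
      rcases (isSub_append_singleton ys x s).mp hs with hsub | hsuf
      · have := hbmin s hsub
        have h2 := min_le_left b (min x (c + x))
        omega
      · have hc' : min x (c + x) ≤ s := by
          rcases (isSuf_append_singleton ys x s).mp hsuf with rfl | ⟨s₀, hs₀, rfl⟩
          · exact min_le_left _ _
          · have := hcmin s₀ hs₀
            have h2 := min_le_right x (c + x)
            omega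
        have h2 := min_le_right b (min x (c + x))
        omega

lemma b_char (xs : List Int) :
    consecutive_hero_max_alt xs = xs.sum - 2 * (kfold xs).2.2 := by
  have h := (kfold_invariant xs).1
  simp only [consecutive_hero_max_alt]
  rw [show xs.foldl
    (fun (acc : Int × Int × Int) x =>
      let total := acc.1 + x
      let cur := min x (acc.2.1 + x)
      (total, cur, min acc.2.2 cur))
    (0, 0, 0) = kfold xs from rfl, h]

-- ===== VERDICT (by name: the statement is the Claim_ definition above) =====
theorem consecutive_hero_max_spec : Claim_equal_consecutive_hero_max := by
  intro xs _
  unfold Spec_consecutive_hero_max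
  rw [a_char, b_char,
    isMinSub_unique (a_min_isMinSub xs) (kfold_invariant xs).2.2.2]
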